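-- pv_equiv track=rewrite | github.com/Raphael-Loeffler/Python | Date_Structures/sarcasm_case.py | sarcasm
-- ===== SOURCE A (Python) =====
-- def sarcasm(word: str) -> str:
--   out: str = ""
--   counter: int = 0
--   for c in word:
--     if counter % 2 == 0:
--       out += c.upper()
--     else:
--       out += c
--     counter += 1
--   return out
-- ===== SOURCE B (Python) =====
-- def sarcasm(word: str) -> str:
--     # consume the string two characters at a time: uppercase the first of each pair
--     it = iter(word)
--     parts = []
--     for a in it:
--         b = next(it, "")
--         parts.append(a.upper() + b)
--     return "".join(parts)
-- ===== Notes on version B (the rewrite author's own statement) =====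
-- stated objective: alternative
-- what changed: Replaces the per-character loop with an index counter and parity test by a counter-free iterator that consumes the string two characters at a time, uppercasing the first of each pair and joining the collected pair strings.
import Mathlib
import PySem

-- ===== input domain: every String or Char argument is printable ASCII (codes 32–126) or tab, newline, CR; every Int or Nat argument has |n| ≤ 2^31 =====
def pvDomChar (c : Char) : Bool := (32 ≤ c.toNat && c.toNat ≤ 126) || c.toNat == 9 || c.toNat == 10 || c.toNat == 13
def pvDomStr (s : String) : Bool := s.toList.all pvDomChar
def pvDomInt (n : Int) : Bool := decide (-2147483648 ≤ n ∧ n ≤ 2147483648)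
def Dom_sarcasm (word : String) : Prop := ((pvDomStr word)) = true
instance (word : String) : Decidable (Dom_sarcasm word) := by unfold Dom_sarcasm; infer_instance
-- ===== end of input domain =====

-- B replaces A's counter-and-parity per-character loop by a counter-free pairwise consumption of the string (same cost, different decomposition).


-- ===== PORT A =====
-- for c in word: out += c.upper() if counter % 2 == 0 else c; counter += 1
def sarcasm (word : String) : String :=
  String.ofList (word.toList.foldl
    (fun (st : List Char × Int) c =>
      (st.1 ++ (if PySem.Int.mod st.2 2 = 0 then PySem.Chars.upper [c] else [c]), st.2 + 1))
    ([], 0)).1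

-- ===== PORT B =====
-- for a in it: b = next(it, ""); parts.append(a.upper() + b)  — consuming two chars per step is
-- structural recursion on the remaining character list; "".join(parts) is the accumulated flatten
def sarcasmAltChars : List Char → List Char
  | [] => []
  | [c] => PySem.Chars.upper [c] ++ []
  | a :: b :: t => PySem.Chars.upper [a] ++ [b] ++ sarcasmAltChars t

def sarcasm_alt (word : String) : String := String.ofList (sarcasmAltChars word.toList)

-- ===== PRECONDITION & SPEC =====
def Spec_sarcasm (word : String) (out : String) : Prop := out = sarcasm_alt word
instance (word : String) (out : String) : Decidable (Spec_sarcasm word out) := by unfold Spec_sarcasm; infer_instance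

-- ===== CLAIM (what is proved, stated in full; the proofs are below) =====
def Claim_equal_sarcasm : Prop := ∀ (word : String), Dom_sarcasm word → Spec_sarcasm word (sarcasm word)

-- ===== LEMMAS AND PROOFS =====

-- what A's loop produces from counter value k onwards
def scPar (k : Int) : List Char → List Char
  | [] => []
  | c :: t => (if PySem.Int.mod k 2 = 0 then PySem.Chars.upper [c] else [c]) ++ scPar (k + 1) t

theorem foldA_eq_scPar (l : List Char) : ∀ (out : List Char) (k : Int),
    (l.foldl (fun (st : List Char × Int) c =>
      (st.1 ++ (if PySem.Int.mod st.2 2 = 0 then PySem.Chars.upper [c] else [c]), st.2 + 1))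
      (out, k)).1 = out ++ scPar k l := by
  induction l with
  | nil => intro out k; simp [scPar]
  | cons c t ih =>
    intro out k
    simp only [List.foldl_cons, ih, scPar, List.append_assoc]

theorem scPar_eq_alt : ∀ (l : List Char) (k : Int), PySem.Int.mod k 2 = 0 →
    scPar k l = sarcasmAltChars l
  | [], _, _ => rfl
  | [c], k, h => by
    simp only [scPar, sarcasmAltChars, h, reduceIte, List.append_nil]
  | a :: b :: t, k, h => by
    have hd : (2 : Int) ∣ k := (PySem.Int.mod_eq_zero_iff_dvd k 2).mp h
    have h1 : PySem.Int.mod (k + 1) 2 ≠ 0 := by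
      rw [Ne, PySem.Int.mod_eq_zero_iff_dvd]; omega
    have h2 : PySem.Int.mod (k + 1 + 1) 2 = 0 := by
      rw [PySem.Int.mod_eq_zero_iff_dvd]; omega
    simp only [scPar]
    rw [if_pos h, if_neg h1, scPar_eq_alt t (k + 1 + 1) h2]
    simp [sarcasmAltChars, List.append_assoc]

-- ===== VERDICT (by name: the statement is the Claim_ definition above) =====
theorem sarcasm_spec : Claim_equal_sarcasm := by
  intro word _
  show sarcasm word = sarcasm_alt word
  unfold sarcasm sarcasm_alt
  rw [foldA_eq_scPar, scPar_eq_alt word.toList 0 (by decide), List.nil_append]
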